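-- pv_equiv track=rewrite | github.com/habibullinrm/algorythms_q2 | dz_5.py | boot_algo
-- ===== SOURCE A (Python) =====
-- def boot_algo(s: str) -> int:
--     ss = s + s
--     n = len(ss)
--     f = [-1] * n
--     k = 0
--     for j in range(1, n):
--         sj = ss[j]
--         i = f[j - 1 - k]
--         while i != -1 and sj != ss[k + i + 1]:
--             if sj < ss[k + i + 1]:
--                 k = j - i - 1
--             i = f[i]
--         if sj != ss[k + i + 1]:
--             if sj < ss[k]:
--                 k = j
--             f[j - k] = -1
--         else:
--             f[j - k] = i + 1
--     return k
-- ===== SOURCE B (Python) =====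
-- def boot_algo(s: str) -> int:
--     best = 0
--     for i in range(1, len(s)):
--         if s[i:] + s[:i] < s[best:] + s[:best]:
--             best = i
--     return best
-- ===== Notes on version B (the rewrite author's own statement) =====
-- stated objective: simpler
-- what changed: Replaced Booth's failure-function single pass over the doubled string by a direct first-wins argmin over all rotations, comparing each rotation s[i:]+s[:i] lexicographically.
import Mathlib
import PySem

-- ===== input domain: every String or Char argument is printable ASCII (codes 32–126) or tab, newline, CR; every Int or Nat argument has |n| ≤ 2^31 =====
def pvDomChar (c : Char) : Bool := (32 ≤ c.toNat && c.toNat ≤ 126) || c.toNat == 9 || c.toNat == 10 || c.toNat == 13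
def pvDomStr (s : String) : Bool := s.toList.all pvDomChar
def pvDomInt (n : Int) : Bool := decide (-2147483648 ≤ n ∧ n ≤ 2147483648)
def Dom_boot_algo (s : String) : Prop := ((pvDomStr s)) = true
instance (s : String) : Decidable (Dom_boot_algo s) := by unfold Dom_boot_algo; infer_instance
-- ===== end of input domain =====

-- B replaces Booth's failure-function single pass over the doubled string by a direct
-- first-wins argmin over all rotations (simpler; not faster).


-- ===== PORT A =====
-- the inner 'while i != -1 and sj != ss[k+i+1]' loop; fuel is an upper bound on the number of
-- iterations (the chain i := f[i] strictly decreases in every actual run, so ss.length + 2 is enough)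
def bootWhile (t : List Char) (f : List Int) (j : Int) (sj : Char) :
    Nat → Int → Int → Int × Int
  | 0, k, i => (k, i)
  | fuel + 1, k, i =>
    if i ≠ -1 ∧ sj ≠ PySem.List.pyGetD t (k + i + 1) ' ' then
      bootWhile t f j sj fuel
        (if sj < PySem.List.pyGetD t (k + i + 1) ' ' then j - i - 1 else k)
        (PySem.List.pyGetD f i (-1))
    else (k, i)

-- one iteration of the 'for j in range(1, n)' loop, state (f, k)
def bootStep (t : List Char) (st : List Int × Int) (j : Int) : List Int × Int :=
  let f := st.1
  let k := st.2
  let sj := PySem.List.pyGetD t j ' '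
  let r := bootWhile t f j sj (t.length + 2) k (PySem.List.pyGetD f (j - 1 - k) (-1))
  let k1 := r.1
  let i1 := r.2
  if sj ≠ PySem.List.pyGetD t (k1 + i1 + 1) ' ' then
    let k2 := if sj < PySem.List.pyGetD t k1 ' ' then j else k1
    (PySem.List.pySetD f (j - k2) (-1), k2)
  else
    (PySem.List.pySetD f (j - k1) (i1 + 1), k1)

def boot_algo (s : String) : Int :=
  let ss := s.toList ++ s.toList
  let n : Int := PySem.List.len ss
  ((PySem.List.pyRange 1 n 1).foldl (fun st j => bootStep ss st j)
    (PySem.List.pyRepeat [(-1 : Int)] n, 0)).2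

-- ===== PORT B =====
def rotAt (l : List Char) (i : Int) : List Char :=
  PySem.List.slice l (some i) none ++ PySem.List.slice l none (some i)

def boot_algo_alt (s : String) : Int :=
  let l := s.toList
  let n : Int := PySem.List.len l
  (PySem.List.pyRange 1 n 1).foldl
    (fun best i => if rotAt l i < rotAt l best then i else best) 0

-- ===== PRECONDITION & SPEC =====
def Spec_boot_algo (s : String) (out : Int) : Prop := out = boot_algo_alt s
instance (s : String) (out : Int) : Decidable (Spec_boot_algo s out) := by unfold Spec_boot_algo; infer_instance

-- ===== CLAIM (what is proved, stated in full; the proofs are below) =====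
def Claim_equal_boot_algo : Prop := ∀ (s : String), Dom_boot_algo s → Spec_boot_algo s (boot_algo s)

-- ===== LEMMAS AND PROOFS =====
-- The proof is a full correctness proof of Booth's algorithm: `BoothInv` characterises the
-- state (f, k) of A's loop — k is the first-wins argmin of the truncated suffix comparisons
-- of the processed prefix, f the failure table of the current window — and `InnerInv` the
-- state of the inner while loop; at j = len(ss) this forces k to be the first-wins argmin
-- over all rotations, which is exactly what B computes.

-- character of t at Nat position x (out of range never happens in use)
def tch (t : List Char) (x : Nat) : Char := t.getD x ' '

-- equal-length pointwise segment comparison: t[p..p+m-1] vs t[q..q+m-1]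
def segEq (t : List Char) (p q m : Nat) : Prop := ∀ r, r < m → tch t (p+r) = tch t (q+r)

def segLT (t : List Char) (p q m : Nat) : Prop :=
  ∃ r, r < m ∧ segEq t p q r ∧ tch t (p+r) < tch t (q+r)

def segLE (t : List Char) (p q m : Nat) : Prop := segLT t p q m ∨ segEq t p q m

lemma segEq_refl (t : List Char) (p m : Nat) : segEq t p p m := fun _ _ => rfl

lemma segEq_symm {t : List Char} {p q m : Nat} (h : segEq t p q m) : segEq t q p m :=
  fun r hr => (h r hr).symm

lemma segEq_trans {t : List Char} {p q s m : Nat} (h1 : segEq t p q m) (h2 : segEq t q s m) :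
    segEq t p s m := fun r hr => (h1 r hr).trans (h2 r hr)

lemma segEq_mono {t : List Char} {p q m m' : Nat} (h : segEq t p q m) (hm : m' ≤ m) :
    segEq t p q m' := fun r hr => h r (lt_of_lt_of_le hr hm)

lemma segLT_ext {t : List Char} {p q m m' : Nat} (h : segLT t p q m) (hm : m ≤ m') :
    segLT t p q m' := by
  obtain ⟨r, hr, he, hl⟩ := h
  exact ⟨r, lt_of_lt_of_le hr hm, he, hl⟩

lemma segLE_mono {t : List Char} {p q m m' : Nat} (h : segLE t p q m) (hm : m' ≤ m) :
    segLE t p q m' := by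
  rcases h with ⟨r, hr, he, hl⟩ | he
  · rcases lt_or_ge r m' with h' | h'
    · exact Or.inl ⟨r, h', he, hl⟩
    · exact Or.inr (segEq_mono he h')
  · exact Or.inr (segEq_mono he hm)

lemma segLT_append {t : List Char} {p q m : Nat} (he : segEq t p q m)
    (hl : tch t (p+m) < tch t (q+m)) : segLT t p q (m+1) :=
  ⟨m, Nat.lt_succ_self m, he, hl⟩

lemma segLT_trans {t : List Char} {p q s m : Nat} (h1 : segLT t p q m) (h2 : segLT t q s m) :
    segLT t p s m := by
  obtain ⟨r1, hr1, he1, hl1⟩ := h1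
  obtain ⟨r2, hr2, he2, hl2⟩ := h2
  rcases lt_trichotomy r1 r2 with h | h | h
  · exact ⟨r1, hr1, segEq_trans he1 (segEq_mono he2 (le_of_lt h)), by rw [← he2 r1 h]; exact hl1⟩
  · subst h; exact ⟨r1, hr1, segEq_trans he1 he2, lt_trans hl1 hl2⟩
  · exact ⟨r2, hr2, segEq_trans (segEq_mono he1 (le_of_lt h)) he2, by rw [he1 r2 h]; exact hl2⟩

lemma segEq_segLT_trans {t : List Char} {p q s m : Nat} (h1 : segEq t p q m) (h2 : segLT t q s m) :
    segLT t p s m := by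
  obtain ⟨r2, hr2, he2, hl2⟩ := h2
  exact ⟨r2, hr2, segEq_trans (segEq_mono h1 (le_of_lt hr2)) he2, by rw [h1 r2 hr2]; exact hl2⟩

lemma segLT_segEq_trans {t : List Char} {p q s m : Nat} (h1 : segLT t p q m) (h2 : segEq t q s m) :
    segLT t p s m := by
  obtain ⟨r1, hr1, he1, hl1⟩ := h1
  exact ⟨r1, hr1, segEq_trans he1 (segEq_mono h2 (le_of_lt hr1)), by rw [← h2 r1 hr1]; exact hl1⟩

lemma segLT_segLE_trans {t : List Char} {p q s m : Nat} (h1 : segLT t p q m) (h2 : segLE t q s m) :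
    segLT t p s m := by
  rcases h2 with h2 | h2
  · exact segLT_trans h1 h2
  · exact segLT_segEq_trans h1 h2

lemma segLE_trans {t : List Char} {p q s m : Nat} (h1 : segLE t p q m) (h2 : segLE t q s m) :
    segLE t p s m := by
  rcases h1 with h1 | h1
  · exact Or.inl (segLT_segLE_trans h1 h2)
  · rcases h2 with h2 | h2
    · exact Or.inl (segEq_segLT_trans h1 h2)
    · exact Or.inr (segEq_trans h1 h2)

-- m is a (possibly empty) proper border of the segment t[k..k+len-1]
def Border (t : List Char) (k len m : Nat) : Prop := m < len ∧ segEq t k (k + len - m) m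

def borderB (t : List Char) (k len m : Nat) : Bool :=
  decide (m < len) && (List.range m).all (fun r => tch t (k+r) == tch t (k + len - m + r))

lemma borderB_iff {t : List Char} {k len m : Nat} : borderB t k len m = true ↔ Border t k len m := by
  unfold borderB Border segEq
  simp [List.all_eq_true]

-- largest proper border of t[k..k+len-1]
def bmax (t : List Char) (k len : Nat) : Nat :=
  Nat.findGreatest (fun m => borderB t k len m = true) len

lemma border_zero {t : List Char} {k len : Nat} (h : 0 < len) : Border t k len 0 :=
  ⟨h, fun r hr => absurd hr (Nat.not_lt_zero r)⟩

lemma bmax_border {t : List Char} {k len : Nat} (h : 0 < len) : Border t k len (bmax t k len) := by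
  have h0 : borderB t k len 0 = true := borderB_iff.mpr (border_zero h)
  have := Nat.findGreatest_spec (P := fun m => borderB t k len m = true) (Nat.zero_le len) h0
  exact borderB_iff.mp this

lemma bmax_lt {t : List Char} {k len : Nat} (h : 0 < len) : bmax t k len < len :=
  (bmax_border h).1

lemma le_bmax {t : List Char} {k len m : Nat} (h : Border t k len m) : m ≤ bmax t k len :=
  Nat.le_findGreatest (le_of_lt h.1) (borderB_iff.mpr h)

-- border of a border-prefix: for m < b both borders of [k..k+len-1],
-- m is a border of the prefix [k..k+b-1], and conversely.
lemma border_of_border_lt {t : List Char} {k len b m : Nat}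
    (hb : Border t k len b) (hm : Border t k len m) (hmb : m < b) : Border t k b m := by
  obtain ⟨hb1, hb2⟩ := hb
  obtain ⟨hm1, hm2⟩ := hm
  refine ⟨hmb, ?_⟩
  intro r hr
  -- t[k+r] = t[k+len-m+r] (border m) and t[k+b-m+r] = t[k+len-b + (b-m+r)] = t[k+len-m+r] (border b)
  have h1 := hm2 r hr
  have h2 := hb2 (b - m + r) (by omega)
  have e1 : k + len - b + (b - m + r) = k + len - m + r := by omega
  have e2 : k + (b - m + r) = k + b - m + r := by omega
  rw [e1, e2] at h2
  exact h1.trans h2.symm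

lemma border_of_prefix_border {t : List Char} {k len b m : Nat}
    (hb : Border t k len b) (hm : Border t k b m) : Border t k len m := by
  obtain ⟨hb1, hb2⟩ := hb
  obtain ⟨hm1, hm2⟩ := hm
  refine ⟨lt_trans hm1 hb1, ?_⟩
  intro r hr
  have h1 := hm2 r hr
  have h2 := hb2 (b - m + r) (by omega)
  have e1 : k + len - b + (b - m + r) = k + len - m + r := by omega
  have e2 : k + (b - m + r) = k + b - m + r := by omega
  rw [e1, e2] at h2
  exact h1.trans h2

-- borders only depend on the segment's content
lemma border_congr {t : List Char} {a b len len' m : Nat}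
    (hab : segEq t a b len') (hlen : len ≤ len') :
    Border t a len m ↔ Border t b len m := by
  constructor <;> rintro ⟨h1, h2⟩ <;> refine ⟨h1, ?_⟩ <;> intro r hr
  · have e1 := (hab r (by omega)).symm
    have e2 := hab (len - m + r) (by omega)
    have e3 : a + (len - m + r) = a + len - m + r := by omega
    have e4 : b + (len - m + r) = b + len - m + r := by omega
    rw [e3, e4] at e2
    exact e1.trans ((h2 r hr).trans e2)
  · have e1 := hab r (by omega)
    have e2 := (hab (len - m + r) (by omega)).symm
    have e3 : a + (len - m + r) = a + len - m + r := by omega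
    have e4 : b + (len - m + r) = b + len - m + r := by omega
    rw [e3, e4] at e2
    exact e1.trans ((h2 r hr).trans e2)

lemma bmax_congr {t : List Char} {a b len len' : Nat}
    (hab : segEq t a b len') (hlen : len ≤ len') :
    bmax t a len = bmax t b len := by
  rcases Nat.eq_zero_or_pos len with h0 | h0
  · subst h0; rfl
  · apply le_antisymm
    · exact le_bmax ((border_congr hab hlen).mp (bmax_border h0))
    · exact le_bmax ((border_congr hab hlen).mpr (bmax_border h0))

-- border of the one-char extension
lemma border_succ_iff {t : List Char} {k L m : Nat} (hm : 1 ≤ m) :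
    Border t k (L+1) m ↔ (m ≤ L ∧ Border t k L (m-1) ∧ tch t (k + (m-1)) = tch t (k + L)) := by
  constructor
  · rintro ⟨h1, h2⟩
    have hmL : m ≤ L := by omega
    refine ⟨hmL, ⟨by omega, ?_⟩, ?_⟩
    · intro r hr
      have := h2 r (by omega)
      have e : k + (L+1) - m + r = k + L - (m-1) + r := by omega
      rw [e] at this
      exact this
    · have := h2 (m-1) (by omega)
      have e : k + (L+1) - m + (m-1) = k + L := by omega
      rw [e] at this
      exact this
  · rintro ⟨hmL, ⟨h1, h2⟩, h3⟩
    refine ⟨by omega, ?_⟩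
    intro r hr
    rcases Nat.lt_or_ge r (m-1) with h | h
    · have := h2 r h
      have e : k + L - (m-1) + r = k + (L+1) - m + r := by omega
      rw [e] at this
      exact this
    · have hrm : r = m - 1 := by omega
      subst hrm
      have e : k + (L+1) - m + (m-1) = k + L := by omega
      rw [e]
      exact h3

-- small helpers
lemma segLT_single {t : List Char} {p q : Nat} (h : tch t p < tch t q) : segLT t p q 1 :=
  ⟨0, Nat.zero_lt_one, fun r hr => absurd hr (Nat.not_lt_zero r), by simpa using h⟩

lemma segLE_one_char {t : List Char} {p q : Nat} (h : segLE t p q 1) : tch t p ≤ tch t q := by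
  rcases h with ⟨r, hr, _, hl⟩ | he
  · interval_cases r
    · exact le_of_lt (by simpa using hl)
  · simpa using le_of_eq (he 0 Nat.zero_lt_one)

lemma segLT_transfer_left {t : List Char} {a b L q m : Nat}
    (h : segEq t a b L) (hm : m ≤ L) (hl : segLT t a q m) : segLT t b q m :=
  segEq_segLT_trans (segEq_symm (segEq_mono h hm)) hl

lemma segLE_transfer_left {t : List Char} {a b L q m : Nat}
    (h : segEq t a b L) (hm : m ≤ L) (hl : segLE t a q m) : segLE t b q m :=
  segLE_trans (Or.inr (segEq_symm (segEq_mono h hm))) hl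

lemma segEq_transfer_left {t : List Char} {a b L q m : Nat}
    (h : segEq t a b L) (hm : m ≤ L) (hl : segEq t a q m) : segEq t b q m :=
  segEq_trans (segEq_symm (segEq_mono h hm)) hl

-- the outer loop invariant: after the iterations for 1, …, j-1 the state (f, k=K) satisfies it
structure BoothInv (t : List Char) (j : Nat) (f : List Int) (K : Nat) : Prop where
  flen : f.length = t.length
  kj : K < j
  hA : ∀ q, K < q → q < j → segLE t K q (j - q)
  hB : ∀ q, q < K → segLT t K q (j - K)
  hF : ∀ m, m ≤ j - 1 - K → f.getD m (-1) = (bmax t K (m+1) : Int) - 1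

-- the inner (while-loop) invariant; K is the k at loop entry, Kc the current k,
-- ib - 1 the current chain value i (ib = 0 encodes i = -1)
structure InnerInv (t : List Char) (j K Kc ib : Nat) : Prop where
  hKle : K ≤ Kc
  hkj : Kc < j
  hiu : ib + 1 ≤ j - Kc
  hpref : segEq t K Kc (j - Kc)
  hbord : 0 < ib → Border t K (j - Kc) ib
  hI3 : ∀ q, Kc < q → q + ib < j → segLE t Kc q (j - q + 1)
  hI4 : ∀ q, q < Kc → segLT t Kc q (j - Kc + 1)
  hI6 : ∀ m, Border t K (j - Kc) m → ib < m → tch t (K + m) ≠ tch t j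

-- entering the while loop
lemma innerInv_init {t : List Char} {j K : Nat} {f : List Int} (inv : BoothInv t j f K) :
    InnerInv t j K K (bmax t K (j - K)) := by
  have hKj : K < j := inv.kj
  have hwpos : 0 < j - K := by omega
  have hlt := bmax_lt (t := t) (k := K) hwpos
  refine ⟨le_refl K, hKj, by omega, segEq_refl t K (j - K), fun _ => bmax_border hwpos, ?_, ?_, ?_⟩
  · intro q hq hqj
    have hqlt : q < j := by omega
    rcases inv.hA q hq hqlt with hlt' | heq
    · exact Or.inl (segLT_ext hlt' (by omega))
    · -- j - q would be a border of the window larger than bmax: impossible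
      exfalso
      have hbord : Border t K (j - K) (j - q) := by
        refine ⟨by omega, ?_⟩
        have e : K + (j - K) - (j - q) = q := by omega
        rw [e]
        exact heq
      have := le_bmax hbord
      omega
  · intro q hq
    exact segLT_ext (inv.hB q hq) (by omega)
  · intro m hm hgt
    exact absurd (le_bmax hm) (by omega)

-- one while-iteration, mismatch with sj not smaller: k unchanged, i := f[i]
lemma innerStep_noupdate {t : List Char} {j K Kc ib : Nat}
    (hA : ∀ q, K < q → q < j → segLE t K q (j - q))
    (inv : InnerInv t j K Kc ib) (hib : 0 < ib)
    (hne : tch t j ≠ tch t (K + ib)) (hnlt : ¬ tch t j < tch t (K + ib)) :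
    InnerInv t j K Kc (bmax t K ib) := by
  obtain ⟨hKle, hkj, hiu, hpref, hbord, hI3, hI4, hI6⟩ := inv
  have hwin : Border t K (j - Kc) ib := hbord hib
  have hlt := bmax_lt (t := t) (k := K) hib
  set ib' := bmax t K ib with hib'
  refine ⟨hKle, hkj, by omega, hpref, ?_, ?_, hI4, ?_⟩
  · intro h0
    exact border_of_prefix_border hwin (bmax_border hib)
  · intro q hq hqj
    rcases Nat.lt_or_ge (q + ib) j with hcase | hcase
    · exact hI3 q hq hcase
    · -- new candidates: ib' < j - q ≤ ib
      have hmq1 : j - q ≤ ib := by omega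
      have hmq2 : ib' < j - q := by omega
      set mq := j - q with hmq
      have hqj' : q < j := by omega
      have hqK : K < q := by omega
      -- compare t[K..] with t[q..] over mq chars, using the outer invariant hA
      rcases hA q hqK hqj' with hlt' | heq
      · -- strict: transfer to base Kc and extend by one
        exact Or.inl (segLT_ext (segLT_transfer_left hpref (by omega) hlt') (by omega))
      · -- equality: mq is a border of the current window
        have hbmq : Border t K (j - Kc) mq := by
          refine ⟨by omega, ?_⟩
          have heq' : segEq t Kc q mq := segEq_transfer_left hpref (by omega) heq
          -- base-Kc border position is q; convert to base-K statement via hpref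
          have : segEq t Kc (Kc + (j - Kc) - mq) mq := by
            have e2 : Kc + (j - Kc) - mq = q := by omega
            rw [e2]; exact heq'
          -- now shift base Kc → K on both sides
          intro r hr
          have h1 := hpref r (by omega)
          have h2 := hpref (j - Kc - mq + r) (by omega)
          have h3 := this r hr
          have e3 : Kc + (j - Kc - mq + r) = Kc + (j - Kc) - mq + r := by omega
          have e4 : K + (j - Kc - mq + r) = K + (j - Kc) - mq + r := by omega
          rw [e3] at h2
          rw [e4] at h2
          exact h1.trans (h3.trans h2.symm)
        rcases Nat.lt_or_ge mq ib with hmlt | hmge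
        · exfalso
          have := le_bmax (border_of_border_lt hwin hbmq hmlt)
          omega
        · -- mq = ib: strict difference at position ib (candidate char is t[j] > t[K+ib])
          have hmqe : mq = ib := by omega
          have heqc : segEq t Kc q ib := by
            rw [← hmqe]; exact segEq_transfer_left hpref (by omega) heq
          have hchar : tch t (Kc + ib) < tch t (q + ib) := by
            have e : q + ib = j := by omega
            rw [e]
            have e2 : tch t (Kc + ib) = tch t (K + ib) := (hpref ib (by omega)).symm
            rw [e2]
            rcases lt_trichotomy (tch t j) (tch t (K + ib)) with h | h | h
            · exact absurd h hnlt
            · exact absurd h hne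
            · exact h
          exact Or.inl (segLT_ext (segLT_append heqc hchar) (by omega))
  · intro m hm hgt
    rcases Nat.lt_or_ge ib m with h | h
    · exact hI6 m hm h
    · rcases Nat.eq_or_lt_of_le h with h' | h'
      · rw [h']; exact Ne.symm hne
      · exfalso
        have := le_bmax (border_of_border_lt hwin hm h')
        omega

-- one while-iteration, mismatch with sj smaller: k := j - i - 1, i := f[i]
lemma innerStep_update {t : List Char} {j K Kc ib : Nat}
    (hA : ∀ q, K < q → q < j → segLE t K q (j - q))
    (inv : InnerInv t j K Kc ib) (hib : 0 < ib)
    (hlt : tch t j < tch t (K + ib)) :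
    InnerInv t j K (j - ib) (bmax t K ib) := by
  obtain ⟨hKle, hkj, hiu, hpref, hbord, hI3, hI4, hI6⟩ := inv
  have hwin : Border t K (j - Kc) ib := hbord hib
  have hblt := bmax_lt (t := t) (k := K) hib
  set ib' := bmax t K ib with hib'
  have hKc' : j - (j - ib) = ib := by omega
  -- new window t[j-ib..j-1] equals the prefix t[K..K+ib-1] of the old one
  have hpref' : segEq t K (j - ib) ib := by
    intro r hr
    have h1 := hwin.2 r hr
    have h2 := hpref (j - Kc - ib + r) (by omega)
    have e1 : Kc + (j - Kc - ib + r) = j - ib + r := by omega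
    have e2 : K + (j - Kc - ib + r) = K + (j - Kc) - ib + r := by omega
    rw [e1, e2] at h2
    exact h1.trans h2
  -- the new window is strictly smaller than the old candidate at base Kc (length ib+1)
  have hKcLT : segLT t (j - ib) Kc (ib + 1) := by
    have heq : segEq t (j - ib) Kc ib :=
      segEq_trans (segEq_symm hpref') (segEq_mono hpref (by omega))
    have hchar : tch t (j - ib + ib) < tch t (Kc + ib) := by
      have e : j - ib + ib = j := by omega
      rw [e]
      have e2 : tch t (Kc + ib) = tch t (K + ib) := (hpref ib (by omega)).symm
      rw [e2]; exact hlt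
    exact segLT_append heq hchar
  refine ⟨by omega, by omega, ?_, ?_, ?_, ?_, ?_, ?_⟩
  · omega
  · rw [hKc']; exact hpref'
  · rw [hKc']; intro _; exact bmax_border hib
  · -- hI3
    intro q hq hqj
    have hmq1 : j - q < ib := by omega
    have hmq2 : ib' < j - q := by omega
    set mq := j - q with hmq
    have hqj' : q < j := by omega
    have hqK : K < q := by omega
    rcases hA q hqK hqj' with hlt' | heq
    · exact Or.inl (segLT_ext (segLT_transfer_left hpref' (by omega) hlt') (by omega))
    · exfalso
      have hbmq : Border t K (j - Kc) mq := by
        refine ⟨by omega, ?_⟩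
        have heq' : segEq t Kc q mq := segEq_transfer_left hpref (by omega) heq
        have : segEq t Kc (Kc + (j - Kc) - mq) mq := by
          have e2 : Kc + (j - Kc) - mq = q := by omega
          rw [e2]; exact heq'
        intro r hr
        have h1 := hpref r (by omega)
        have h2 := hpref (j - Kc - mq + r) (by omega)
        have h3 := this r hr
        have e3 : Kc + (j - Kc - mq + r) = Kc + (j - Kc) - mq + r := by omega
        have e4 : K + (j - Kc - mq + r) = K + (j - Kc) - mq + r := by omega
        rw [e3] at h2
        rw [e4] at h2
        exact h1.trans (h3.trans h2.symm)
      have := le_bmax (border_of_border_lt hwin hbmq (by omega))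
      omega
  · -- hI4
    intro q hq
    rw [hKc']
    rcases Nat.lt_trichotomy q Kc with h | h | h
    · exact segLT_segLE_trans hKcLT (segLE_mono (Or.inl (hI4 q h)) (by omega))
    · rw [← h] at hKcLT; exact hKcLT
    · exact segLT_segLE_trans hKcLT (segLE_mono (hI3 q h (by omega)) (by omega))
  · -- hI6
    intro m hm hgt
    exfalso
    rw [hKc'] at hm
    have := le_bmax hm
    omega

lemma getD_set_ne' (l : List Int) (i j : Nat) (v : Int) (h : i ≠ j) :
    (l.set i v).getD j (-1) = l.getD j (-1) := by
  simp [List.getD, List.getElem?_set_ne h]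

lemma getD_set_self' (l : List Int) (i : Nat) (v : Int) (h : i < l.length) :
    (l.set i v).getD i (-1) = v := by
  simp [List.getD, h]

-- loop exit, matching branch (sj == ss[k+i+1], including i = -1 with sj == ss[k]):
-- f[j-k] := i+1, k unchanged
lemma exit_match {t : List Char} {f : List Int} {j K Kf ibf : Nat}
    (inv : BoothInv t j f K) (hjN : j < t.length)
    (ii : InnerInv t j K Kf ibf) (hmatch : tch t j = tch t (K + ibf)) :
    BoothInv t (j+1) (f.set (j - Kf) ((ibf : Int))) Kf := by
  obtain ⟨hKle, hkj, hiu, hpref, hbord, hI3, hI4, hI6⟩ := ii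
  set L := j - Kf with hL
  have hL1 : 1 ≤ L := by omega
  have hKfL : Kf + L = j := by omega
  refine ⟨by simpa using inv.flen, by omega, ?_, ?_, ?_⟩
  · -- hA
    intro q hq hqj
    have hgoal : j + 1 - q = (j - q) + 1 := by omega
    rw [hgoal]
    rcases Nat.lt_or_ge (q + ibf) j with hcase | hcase
    · exact hI3 q hq hcase
    · set m := j - q with hm
      have hmibf : m ≤ ibf := by omega
      have hdisp : segLT t K q m ∨ segEq t K q m := by
        rcases Nat.eq_zero_or_pos m with h0 | h0
        · exact Or.inr (by rw [h0]; intro r hr; omega)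
        · have := inv.hA q (by omega) (by omega)
          rw [← hm] at this
          exact this
      rcases hdisp with hlt' | heq
      · exact Or.inl (segLT_ext (segLT_transfer_left hpref (by omega) hlt') (by omega))
      · rcases Nat.eq_or_lt_of_le hmibf with hmeq | hmlt
        · -- m = ibf: full equality, using the matched character
          refine Or.inr ?_
          intro r hr
          rcases Nat.lt_or_ge r m with h | h
          · exact (hpref r (by omega)).symm.trans (heq r h)
          · have hrm : r = m := by omega
            subst hrm
            have e1 : q + m = j := by omega
            have e2 : tch t (Kf + m) = tch t (K + m) := (hpref m (by omega)).symm
            rw [e1, e2, hmeq]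
            exact hmatch.symm
        · -- m < ibf: reduce to the occurrence q'' = Kf + ibf - m of the same word
          have hibf1 : 0 < ibf := by omega
          have Bw : Border t K L ibf := hbord hibf1
          have Bm : Border t K L m := by
            rcases Nat.eq_zero_or_pos m with h0 | h0
            · rw [h0]; exact border_zero (by omega)
            · refine ⟨by omega, ?_⟩
              intro r hr
              have h1 := heq r hr
              have h2 := hpref (L - m + r) (by omega)
              have e1 : Kf + (L - m + r) = q + r := by omega
              have e2 : K + (L - m + r) = K + L - m + r := by omega
              rw [e1, e2] at h2
              exact h1.trans h2.symm
          have Bpm : Border t K ibf m := border_of_border_lt Bw Bm hmlt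
          have hqq : segEq t q (Kf + ibf - m) (m+1) := by
            intro r hr
            rcases Nat.lt_or_ge r m with h | h
            · have h1 := (heq r h).symm
              have h2 := Bpm.2 r h
              have h3 := hpref (ibf - m + r) (by omega)
              have e1 : K + (ibf - m + r) = K + ibf - m + r := by omega
              have e2 : Kf + (ibf - m + r) = Kf + ibf - m + r := by omega
              rw [e1, e2] at h3
              exact h1.trans (h2.trans h3)
            · have hrm : r = m := by omega
              subst hrm
              have e1 : q + m = j := by omega
              have e2 : Kf + ibf - m + m = Kf + ibf := by omega
              have e3 : tch t (Kf + ibf) = tch t (K + ibf) := (hpref ibf (by omega)).symm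
              rw [e1, e2, e3]
              exact hmatch
          have hAq : segLE t K (Kf + ibf - m) (j - (Kf + ibf - m)) :=
            inv.hA (Kf + ibf - m) (by omega) (by omega)
          have hmono : segLE t K (Kf + ibf - m) (m+1) := segLE_mono hAq (by omega)
          have htr : segLE t Kf (Kf + ibf - m) (m+1) :=
            segLE_transfer_left hpref (by omega) hmono
          exact segLE_trans htr (Or.inr (segEq_symm hqq))
  · -- hB
    intro q hq
    have e : j + 1 - Kf = (j - Kf) + 1 := by omega
    rw [e]
    exact hI4 q hq
  · -- hF
    intro m hm
    have hmL : m ≤ L := by omega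
    have hjKN : j - Kf < f.length := by have := inv.flen; omega
    rcases Nat.lt_or_ge m L with hlt | hge
    · rw [getD_set_ne' f (j - Kf) m _ (by omega)]
      have h1 := inv.hF m (by omega)
      rw [h1]
      have e := bmax_congr (t := t) hpref (by omega : m + 1 ≤ j - Kf)
      rw [e]
    · have hmeq : m = L := by omega
      subst hmeq
      rw [getD_set_self' f (j - Kf) _ hjKN]
      -- bmax t Kf (L+1) = ibf + 1
      have hup : Border t Kf (L+1) (ibf+1) := by
        rw [border_succ_iff (by omega)]
        refine ⟨by omega, ?_, ?_⟩
        · simp only [Nat.add_sub_cancel]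
          rcases Nat.eq_zero_or_pos ibf with h0 | h0
          · rw [h0]; exact border_zero (by omega)
          · exact (border_congr hpref (le_refl L)).mp (hbord h0)
        · simp only [Nat.add_sub_cancel]
          have e1 : tch t (Kf + ibf) = tch t (K + ibf) := (hpref ibf (by omega)).symm
          have e2 : Kf + L = j := by omega
          rw [e1, e2]
          exact hmatch.symm
      have hle : bmax t Kf (L+1) ≤ ibf + 1 := by
        by_contra hcon
        push Not at hcon
        have hb := bmax_border (t := t) (k := Kf) (len := L+1) (by omega)
        set b := bmax t Kf (L+1) with hbdef
        have hb1 : 1 ≤ b := by omega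
        rw [border_succ_iff hb1] at hb
        obtain ⟨hbL, hbb, hbc⟩ := hb
        have hKbord : Border t K L (b-1) := (border_congr hpref (le_refl L)).mpr hbb
        have := hI6 (b-1) hKbord (by omega)
        apply this
        have e1 : tch t (K + (b-1)) = tch t (Kf + (b-1)) := hpref (b-1) (by omega)
        rw [e1, hbc, hKfL]
      have : bmax t Kf (L+1) = ibf + 1 := le_antisymm hle (le_bmax hup)
      rw [this]
      push_cast
      ring

-- loop exit with i = -1 and sj < ss[k]: k := j, f[0] := -1
lemma exit_nomatch_lt {t : List Char} {f : List Int} {j K Kf : Nat}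
    (inv : BoothInv t j f K) (hjN : j < t.length)
    (ii : InnerInv t j K Kf 0) (hlt : tch t j < tch t K) :
    BoothInv t (j+1) (f.set 0 (-1)) j := by
  obtain ⟨hKle, hkj, hiu, hpref, _, hI3, hI4, _⟩ := ii
  refine ⟨by simpa using inv.flen, by omega, ?_, ?_, ?_⟩
  · intro q hq hqj; omega
  · intro q hq
    have e : j + 1 - j = 1 := by omega
    rw [e]
    apply segLT_single
    have hKq : tch t K ≤ tch t q := by
      rcases Nat.lt_trichotomy q K with h | h | h
      · exact segLE_one_char (segLE_mono (Or.inl (inv.hB q h)) (by omega))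
      · rw [h]
      · exact segLE_one_char (segLE_mono (inv.hA q h (by omega)) (by omega))
    exact lt_of_lt_of_le hlt hKq
  · intro m hm
    have hm0 : m = 0 := by omega
    subst hm0
    rw [getD_set_self' f 0 _ (by have := inv.flen; omega)]
    have : bmax t j 1 = 0 := by
      have := bmax_lt (t := t) (k := j) (len := 1) Nat.one_pos
      omega
    rw [this]
    simp

-- loop exit with i = -1 and sj ≠ ss[k], not smaller: k unchanged, f[j-k] := -1
lemma exit_nomatch_gt {t : List Char} {f : List Int} {j K Kf : Nat}
    (inv : BoothInv t j f K) (hjN : j < t.length)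
    (ii : InnerInv t j K Kf 0)
    (hne : tch t j ≠ tch t K) (hnlt : ¬ tch t j < tch t K) :
    BoothInv t (j+1) (f.set (j - Kf) (-1)) Kf := by
  obtain ⟨hKle, hkj, hiu, hpref, _, hI3, hI4, hI6⟩ := ii
  set L := j - Kf with hL
  have hgt : tch t K < tch t j := by
    rcases lt_trichotomy (tch t j) (tch t K) with h | h | h
    · exact absurd h hnlt
    · exact absurd h hne
    · exact h
  refine ⟨by simpa using inv.flen, by omega, ?_, ?_, ?_⟩
  · intro q hq hqj
    rcases Nat.lt_or_ge q j with hcase | hcase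
    · have := hI3 q hq (by omega)
      have e : j + 1 - q = j - q + 1 := by omega
      rw [e]
      exact this
    · have hqj' : q = j := by omega
      subst hqj'
      have e : q + 1 - q = 1 := by omega
      rw [e]
      apply Or.inl (segLT_single ?_)
      have : tch t (Kf + 0) = tch t (K + 0) := (hpref 0 (by omega)).symm
      simpa using lt_of_le_of_lt (le_of_eq (by simpa using this)) hgt
  · intro q hq
    have e : j + 1 - Kf = L + 1 := by omega
    rw [e]
    exact hI4 q hq
  · intro m hm
    have hjKN : j - Kf < f.length := by have := inv.flen; omega
    rcases Nat.lt_or_ge m L with hltm | hgem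
    · rw [getD_set_ne' f (j - Kf) m _ (by omega)]
      rw [inv.hF m (by omega)]
      rw [bmax_congr (t := t) hpref (by omega : m + 1 ≤ j - Kf)]
    · have hmeq : m = L := by omega
      subst hmeq
      rw [getD_set_self' f (j - Kf) _ hjKN]
      have hzero : bmax t Kf (L+1) = 0 := by
        by_contra hcon
        have hb := bmax_border (t := t) (k := Kf) (len := L+1) (by omega)
        set b := bmax t Kf (L+1) with hbdef
        have hb1 : 1 ≤ b := by omega
        rw [border_succ_iff hb1] at hb
        obtain ⟨hbL, hbb, hbc⟩ := hb
        rcases Nat.eq_or_lt_of_le hb1 with h1 | h1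
        · -- b = 1: t[Kf] = t[Kf+L] = t[j], contradicting hne
          apply hne
          have e1 : tch t (Kf + (b-1)) = tch t (Kf + 0) := by rw [← h1]
          have e2 : tch t (Kf + 0) = tch t (K + 0) := (hpref 0 (by omega)).symm
          have e3 : Kf + L = j := by omega
          rw [e3] at hbc
          calc tch t j = tch t (Kf + (b-1)) := hbc.symm
            _ = tch t K := by rw [e1]; simpa using e2
        · -- b ≥ 2: border b-1 ≥ 1 > 0 contradicts hI6
          have hKbord : Border t K L (b-1) := (border_congr hpref (le_refl L)).mpr hbb
          apply hI6 (b-1) hKbord (by omega)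
          have e1 : tch t (K + (b-1)) = tch t (Kf + (b-1)) := hpref (b-1) (by omega)
          have e3 : Kf + L = j := by omega
          rw [e3] at hbc
          rw [e1, hbc]
      rw [hzero]
      simp

lemma bootWhile_run {t : List Char} {f : List Int} {j K : Nat}
    (inv : BoothInv t j f K) :
    ∀ ib fuel : Nat, ib + 1 ≤ fuel → ∀ Kc : Nat, InnerInv t j K Kc ib →
    ∃ Kf ibf : Nat,
      bootWhile t f (j:Int) (tch t j) fuel (Kc:Int) ((ib:Int) - 1) = ((Kf:Int), (ibf:Int) - 1) ∧
      InnerInv t j K Kf ibf ∧ (ibf = 0 ∨ tch t j = tch t (K + ibf)) := by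
  intro ib
  induction ib using Nat.strong_induction_on with
  | _ ib IH =>
    intro fuel hfuel Kc hinv
    obtain ⟨fl, rfl⟩ : ∃ fl, fuel = fl + 1 := ⟨fuel - 1, by omega⟩
    rcases Nat.eq_zero_or_pos ib with hib0 | hibpos
    · subst hib0
      refine ⟨Kc, 0, ?_, hinv, Or.inl rfl⟩
      show bootWhile t f (j:Int) (tch t j) (fl+1) (Kc:Int) ((0:Int) - 1) = _
      rw [bootWhile]
      rw [if_neg]
      · norm_num
      · intro hcon
        exact hcon.1 (by norm_num)
    · -- ib ≥ 1: the chain value i = ib - 1 ≥ 0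
      have hch : PySem.List.pyGetD t ((Kc:Int) + ((ib:Int) - 1) + 1) ' ' = tch t (K + ib) := by
        have e : (Kc:Int) + ((ib:Int) - 1) + 1 = ((Kc + ib : Nat) : Int) := by push_cast; ring
        rw [e, PySem.List.pyGetD_natCast]
        exact (hinv.hpref ib (by have := hinv.hiu; omega)).symm
      by_cases hne : tch t j = tch t (K + ib)
      · -- match: loop exits
        refine ⟨Kc, ib, ?_, hinv, Or.inr hne⟩
        rw [bootWhile, if_neg]
        intro hcon
        rw [hch] at hcon
        exact hcon.2 hne
      · -- mismatch: one more iteration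
        have hread : PySem.List.pyGetD f ((ib:Int) - 1) (-1) = ((bmax t K ib : Nat) : Int) - 1 := by
          have e : (ib:Int) - 1 = ((ib - 1 : Nat) : Int) := by omega
          rw [e, PySem.List.pyGetD_natCast]
          have h1 := inv.hF (ib - 1) (by
            have h2 := hinv.hiu
            have h3 := hinv.hKle
            have h4 := hinv.hkj
            omega)
          have e2 : ib - 1 + 1 = ib := by omega
          rw [e2] at h1
          exact h1
        have hblt := bmax_lt (t := t) (k := K) hibpos
        have hstep : bootWhile t f (j:Int) (tch t j) (fl+1) (Kc:Int) ((ib:Int) - 1) =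
            bootWhile t f (j:Int) (tch t j) fl
              (if tch t j < tch t (K + ib) then (j:Int) - ((ib:Int) - 1) - 1 else (Kc:Int))
              (((bmax t K ib : Nat) : Int) - 1) := by
          rw [bootWhile, if_pos, hch, hread]
          rw [hch]
          constructor
          · intro hcon
            omega
          · exact fun h => hne h
        by_cases hlt : tch t j < tch t (K + ib)
        · have e : (j:Int) - ((ib:Int) - 1) - 1 = ((j - ib : Nat) : Int) := by
            have h2 := hinv.hiu
            have h4 := hinv.hkj
            omega
          rw [if_pos hlt, e] at hstep
          obtain ⟨Kf, ibf, h1, h2, h3⟩ :=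
            IH (bmax t K ib) hblt fl (by omega) (j - ib)
              (innerStep_update inv.hA hinv hibpos hlt)
          exact ⟨Kf, ibf, hstep.trans h1, h2, h3⟩
        · rw [if_neg hlt] at hstep
          obtain ⟨Kf, ibf, h1, h2, h3⟩ :=
            IH (bmax t K ib) hblt fl (by omega) Kc
              (innerStep_noupdate inv.hA hinv hibpos hne hlt)
          exact ⟨Kf, ibf, hstep.trans h1, h2, h3⟩

lemma bootStep_inv {t : List Char} {f : List Int} {j K : Nat}
    (inv : BoothInv t j f K) (hjN : j < t.length) :
    ∃ (f' : List Int) (K' : Nat),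
      bootStep t (f, (K:Int)) (j:Int) = (f', (K':Int)) ∧ BoothInv t (j+1) f' K' := by
  have hKj : K < j := inv.kj
  have hsj : PySem.List.pyGetD t (j:Int) ' ' = tch t j := by
    rw [PySem.List.pyGetD_natCast]; rfl
  have hi0 : PySem.List.pyGetD f ((j:Int) - 1 - (K:Int)) (-1) =
      ((bmax t K (j - K) : Nat) : Int) - 1 := by
    have e : (j:Int) - 1 - (K:Int) = ((j - 1 - K : Nat) : Int) := by omega
    rw [e, PySem.List.pyGetD_natCast]
    have h1 := inv.hF (j - 1 - K) (le_refl _)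
    have e2 : j - 1 - K + 1 = j - K := by omega
    rw [e2] at h1
    exact h1
  have hwpos : 0 < j - K := by omega
  have hfuel : bmax t K (j - K) + 1 ≤ t.length + 2 := by
    have := bmax_lt (t := t) (k := K) hwpos
    omega
  obtain ⟨Kf, ibf, hrun, hexit, hdisj⟩ :=
    bootWhile_run inv (bmax t K (j - K)) (t.length + 2) hfuel K (innerInv_init inv)
  have hKfj : Kf < j := hexit.hkj
  have hibfL : ibf + 1 ≤ j - Kf := hexit.hiu
  have htest : PySem.List.pyGetD t ((Kf:Int) + ((ibf:Int) - 1) + 1) ' ' = tch t (K + ibf) := by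
    have e : (Kf:Int) + ((ibf:Int) - 1) + 1 = ((Kf + ibf : Nat) : Int) := by push_cast; ring
    rw [e, PySem.List.pyGetD_natCast]
    exact (hexit.hpref ibf (by omega)).symm
  -- unfold bootStep up to the branch
  show ∃ (f' : List Int) (K' : Nat), (let sj := PySem.List.pyGetD t (j:Int) ' ';
      let r := bootWhile t f (j:Int) sj (t.length + 2) (K:Int)
        (PySem.List.pyGetD f ((j:Int) - 1 - (K:Int)) (-1));
      let k1 := r.1; let i1 := r.2;
      if sj ≠ PySem.List.pyGetD t (k1 + i1 + 1) ' ' then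
        let k2 := if sj < PySem.List.pyGetD t k1 ' ' then (j:Int) else k1
        (PySem.List.pySetD f ((j:Int) - k2) (-1), k2)
      else (PySem.List.pySetD f ((j:Int) - k1) (i1 + 1), k1)) = (f', (K':Int)) ∧
      BoothInv t (j+1) f' K'
  simp only [hsj, hi0, hrun]
  by_cases hm : tch t j = tch t (K + ibf)
  · -- else-branch: match
    rw [if_neg (by rw [htest]; exact fun hcon => hcon hm)]
    refine ⟨_, Kf, rfl.trans ?_, exit_match inv hjN hexit hm⟩
    have e1 : (j:Int) - (Kf:Int) = ((j - Kf : Nat) : Int) := by omega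
    have e2 : ((ibf:Int) - 1) + 1 = ((ibf : Nat) : Int) := by ring
    rw [e1, e2, PySem.List.pySetD_natCast]
  · -- mismatch after loop: ibf = 0
    have hibf0 : ibf = 0 := by
      rcases hdisj with h | h
      · exact h
      · exact absurd h hm
    subst hibf0
    rw [if_pos (by rw [htest]; simpa using hm)]
    have hK0 : PySem.List.pyGetD t ((Kf:Int)) ' ' = tch t K := by
      rw [PySem.List.pyGetD_natCast]
      have := (hexit.hpref 0 (by omega)).symm
      simpa using this
    by_cases hlt : tch t j < tch t K
    · rw [if_pos (by rw [hK0]; exact hlt)]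
      refine ⟨_, j, rfl.trans ?_, exit_nomatch_lt inv hjN hexit hlt⟩
      have e1 : (j:Int) - (j:Int) = ((0 : Nat) : Int) := by omega
      rw [e1, PySem.List.pySetD_natCast]
    · rw [if_neg (by rw [hK0]; exact hlt)]
      refine ⟨_, Kf, rfl.trans ?_, exit_nomatch_gt inv hjN hexit (by simpa using hm) hlt⟩
      have e1 : (j:Int) - (Kf:Int) = ((j - Kf : Nat) : Int) := by omega
      rw [e1, PySem.List.pySetD_natCast]

lemma replicate_getD_neg1 (N m : Nat) : (List.replicate N (-1 : Int)).getD m (-1) = -1 := by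
  rcases Nat.lt_or_ge m N with h | h
  · simp [List.getD, h]
  · have : (List.replicate N (-1 : Int))[m]? = none := by
      rw [List.getElem?_eq_none_iff]
      simpa using h
    simp [List.getD, this]

lemma bmax_one (t : List Char) (k : Nat) : bmax t k 1 = 0 := by
  have := bmax_lt (t := t) (k := k) (len := 1) Nat.one_pos
  omega

lemma boothInv_one (t : List Char) :
    BoothInv t 1 (PySem.List.pyRepeat [(-1 : Int)] ((t.length : Nat) : Int)) 0 := by
  rw [PySem.List.pyRepeat_singleton]
  refine ⟨by simp, Nat.one_pos, ?_, ?_, ?_⟩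
  · intro q hq hqj; omega
  · intro q hq; omega
  · intro m hm
    have hm0 : m = 0 := by omega
    subst hm0
    rw [Int.toNat_natCast, replicate_getD_neg1, bmax_one]
    simp

lemma runBooth_inv (t : List Char) :
    ∀ jj, 1 ≤ jj → jj ≤ t.length →
    ∃ (f : List Int) (K : Nat),
      (PySem.List.pyRange 1 (jj:Int) 1).foldl (fun st j => bootStep t st j)
        (PySem.List.pyRepeat [(-1:Int)] ((t.length : Nat) : Int), 0) = (f, (K:Int)) ∧
      BoothInv t jj f K := by
  intro jj
  induction jj with
  | zero => omega
  | succ m IH =>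
    intro _ h2
    rcases Nat.eq_zero_or_pos m with hm0 | hmpos
    · subst hm0
      refine ⟨_, 0, ?_, boothInv_one t⟩
      rw [PySem.List.pyRange_one_eq_nil (by norm_num)]
      rfl
    · obtain ⟨f, K, hfold, hinv⟩ := IH hmpos (by omega)
      obtain ⟨f', K', hstep, hinv'⟩ := bootStep_inv hinv (by omega : m < t.length)
      refine ⟨f', K', ?_, hinv'⟩
      have e : ((m+1 : Nat) : Int) = (m : Int) + 1 := by push_cast; ring
      rw [e, PySem.List.pyRange_one_succ_right (by exact_mod_cast Nat.one_le_cast.mpr hmpos),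
        List.foldl_append, hfold]
      simpa using hstep

-- lexicographic comparison of equal-length lists, pointwise
lemma lex_iff_seg : ∀ (u v : List Char), u.length = v.length →
    (u < v ↔ ∃ r, r < u.length ∧ (∀ s, s < r → u.getD s ' ' = v.getD s ' ') ∧
      u.getD r ' ' < v.getD r ' ')
  | [], [] => by
    intro _
    simp only [List.length_nil]
    constructor
    · intro h; exact absurd h (List.not_lex_nil)
    · rintro ⟨r, hr, _⟩; omega
  | [], b :: v => by intro h; simp at h
  | a :: u, [] => by intro h; simp at h
  | a :: u, b :: v => by
    intro h
    have hlen : u.length = v.length := by simpa using h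
    constructor
    · intro hlt
      rcases List.cons_lex_cons_iff.mp hlt with hab | ⟨hab, hrec⟩
      · exact ⟨0, by simp, by omega, by simpa using hab⟩
      · obtain ⟨r, hr, hpre, hl⟩ := (lex_iff_seg u v hlen).mp hrec
        refine ⟨r + 1, by simpa using hr, ?_, by simpa using hl⟩
        intro s hs
        cases s with
        | zero => simpa using hab
        | succ s' => simpa using hpre s' (by omega)
    · rintro ⟨r, hr, hpre, hl⟩
      apply List.cons_lex_cons_iff.mpr
      cases r with
      | zero => exact Or.inl (by simpa using hl)
      | succ r' =>
        refine Or.inr ⟨by simpa using hpre 0 (by omega), ?_⟩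
        apply (lex_iff_seg u v hlen).mpr
        refine ⟨r', by simpa using hr, ?_, by simpa using hl⟩
        intro s hs
        simpa using hpre (s+1) (by omega)

lemma list_eq_iff_seg (u v : List Char) (h : u.length = v.length) :
    u = v ↔ ∀ r, r < u.length → u.getD r ' ' = v.getD r ' ' := by
  constructor
  · intro he r hr; rw [he]
  · intro hall
    apply List.ext_getElem h
    intro i h1 h2
    have := hall i h1
    rwa [List.getD_eq_getElem _ _ h1, List.getD_eq_getElem _ _ h2] at this

-- the rotation s[q:] + s[:q] as a segment of the doubled list
lemma rotAt_eq (l : List Char) (q : Nat) (hq : q ≤ l.length) :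
    rotAt l (q : Int) = ((l ++ l).drop q).take l.length := by
  unfold rotAt
  rw [PySem.List.slice_from l (by exact_mod_cast Nat.zero_le q),
      PySem.List.slice_to l (by exact_mod_cast Nat.zero_le q)]
  simp only [Int.toNat_natCast]
  rw [List.drop_append_of_le_length hq, List.take_append]
  have h1 : List.take l.length (List.drop q l) = List.drop q l :=
    List.take_of_length_le (by rw [List.length_drop]; omega)
  rw [h1, List.length_drop]
  congr 2
  omega

lemma rotAt_length (l : List Char) (q : Nat) (hq : q ≤ l.length) :
    (rotAt l (q : Int)).length = l.length := by
  rw [rotAt_eq l q hq]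
  simp
  omega

lemma rotAt_getD (l : List Char) (q r : Nat) (hq : q ≤ l.length) (hr : r < l.length) :
    (rotAt l (q : Int)).getD r ' ' = tch (l ++ l) (q + r) := by
  rw [rotAt_eq l q hq]
  unfold tch
  rcases Nat.lt_or_ge (q + r) ((l ++ l).length) with h | h
  · rw [List.getD_eq_getElem _ _ (by simp; omega), List.getD_eq_getElem _ _ (by simpa using h)]
    simp
  · exfalso
    simp at h
    omega

lemma rot_lt_iff (l : List Char) (p q : Nat) (hp : p ≤ l.length) (hq : q ≤ l.length) :
    rotAt l (p : Int) < rotAt l (q : Int) ↔ segLT (l ++ l) p q l.length := by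
  rw [lex_iff_seg _ _ (by rw [rotAt_length l p hp, rotAt_length l q hq])]
  rw [rotAt_length l p hp]
  unfold segLT segEq
  constructor
  · rintro ⟨r, hr, hpre, hl⟩
    refine ⟨r, hr, ?_, ?_⟩
    · intro s hs
      have := hpre s hs
      rwa [rotAt_getD l p s hp (by omega), rotAt_getD l q s hq (by omega)] at this
    · rwa [rotAt_getD l p r hp hr, rotAt_getD l q r hq hr] at hl
  · rintro ⟨r, hr, hpre, hl⟩
    refine ⟨r, hr, ?_, ?_⟩
    · intro s hs
      rw [rotAt_getD l p s hp (by omega), rotAt_getD l q s hq (by omega)]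
      exact hpre s hs
    · rwa [rotAt_getD l p r hp hr, rotAt_getD l q r hq hr]

lemma rot_eq_iff (l : List Char) (p q : Nat) (hp : p ≤ l.length) (hq : q ≤ l.length) :
    rotAt l (p : Int) = rotAt l (q : Int) ↔ segEq (l ++ l) p q l.length := by
  rw [list_eq_iff_seg _ _ (by rw [rotAt_length l p hp, rotAt_length l q hq])]
  rw [rotAt_length l p hp]
  unfold segEq
  constructor
  · intro hall r hr
    have := hall r hr
    rwa [rotAt_getD l p r hp hr, rotAt_getD l q r hq hr] at this
  · intro hall r hr
    rw [rotAt_getD l p r hp hr, rotAt_getD l q r hq hr]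
    exact hall r hr

lemma tch_mod (l : List Char) (x : Nat) (hx : x < 2 * l.length) :
    tch (l ++ l) x = tch l (x % l.length) := by
  have hn : 0 < l.length := by omega
  unfold tch
  rcases Nat.lt_or_ge x l.length with h | h
  · rw [Nat.mod_eq_of_lt h]
    rw [List.getD_eq_getElem _ _ (by simp; omega), List.getD_eq_getElem _ _ h]
    exact List.getElem_append_left h
  · have hmod : x % l.length = x - l.length := by
      rw [Nat.mod_eq_sub_mod h, Nat.mod_eq_of_lt (by omega)]
    rw [hmod]
    rw [List.getD_eq_getElem _ _ (by simp; omega), List.getD_eq_getElem _ _ (by omega)]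
    rw [List.getElem_append_right h]

-- two rotations that agree on n characters agree wherever both indices are in bounds
lemma seg_full_ext (l : List Char) (p q : Nat) (hp : p < l.length) (hq : q < l.length)
    (he : segEq (l ++ l) p q l.length) :
    ∀ y, p + y < 2 * l.length → q + y < 2 * l.length →
      tch (l ++ l) (p + y) = tch (l ++ l) (q + y) := by
  intro y h1 h2
  have hn : 0 < l.length := by omega
  set n := l.length with hn'
  have hr : y % n < n := Nat.mod_lt y hn
  have hcong : ∀ a : Nat, (a + y) % n = (a + y % n) % n := by
    intro a
    conv_rhs => rw [Nat.add_mod, Nat.mod_mod_of_dvd _ dvd_rfl, ← Nat.add_mod]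
  have step : ∀ a : Nat, a < n → a + y < 2 * n → tch (l ++ l) (a + y) = tch l ((a + y % n) % n) := by
    intro a ha hay
    rw [tch_mod l _ hay, hcong a]
  rw [step p hp h1, step q hq h2]
  -- now relate (p + y%n) % n and (q + y%n) % n through he
  have hback : ∀ a : Nat, a < n → tch l ((a + y % n) % n) = tch (l ++ l) (a + y % n) := by
    intro a ha
    rw [tch_mod l _ (by omega)]
  rw [hback p hp, hback q hq]
  exact he (y % n) hr

lemma final_K_lt_n {l : List Char} {f : List Int} {K : Nat}
    (hn : 1 ≤ l.length)
    (inv : BoothInv (l ++ l) (l ++ l).length f K) : K < l.length := by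
  set n := l.length with hn'
  have hN : (l ++ l).length = 2 * n := by simp [hn']; omega
  by_contra hcon
  push Not at hcon
  have hK2 : K < 2 * n := by have := inv.kj; omega
  have hq : K - n < K := by omega
  have hlt := inv.hB (K - n) hq
  obtain ⟨r, hr, _, hstrict⟩ := hlt
  rw [hN] at hr
  -- but the two segments are equal char by char: t[K-n+x] = t[K+x]
  have : tch (l ++ l) (K + r) = tch (l ++ l) (K - n + r) := by
    have e1 : K + r < 2 * n := by omega
    have e2 : K - n + r < n := by omega
    rw [tch_mod l _ e1, tch_mod l _ (by omega)]
    congr 1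
    rw [Nat.mod_eq_of_lt e2]
    have e3 : K + r = (K - n + r) + n := by omega
    rw [e3, Nat.add_mod_right, Nat.mod_eq_of_lt e2]
  rw [this] at hstrict
  exact lt_irrefl _ hstrict

lemma final_min {l : List Char} {f : List Int} {K : Nat}
    (hn : 1 ≤ l.length)
    (inv : BoothInv (l ++ l) (l ++ l).length f K) :
    ∀ q, q < l.length → segLE (l ++ l) K q l.length := by
  set n := l.length with hn'
  have hN : (l ++ l).length = 2 * n := by simp [hn']; omega
  have hKn : K < n := final_K_lt_n hn inv
  intro q hq
  rcases Nat.lt_trichotomy q K with h | h | h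
  · -- q < K: strict over N - K chars; restrict to n
    have hlt := inv.hB q h
    rw [hN] at hlt
    obtain ⟨r, hr, hpre, hstrict⟩ := hlt
    rcases Nat.lt_or_ge r n with hrn | hrn
    · exact Or.inl ⟨r, hrn, hpre, hstrict⟩
    · -- first n chars equal: full equality, contradicting the strict position
      exfalso
      have he : segEq (l ++ l) K q n := segEq_mono hpre hrn
      have := seg_full_ext l K q hKn (by omega) he r (by omega) (by omega)
      rw [this] at hstrict
      exact lt_irrefl _ hstrict
  · rw [h]; exact Or.inr (segEq_refl _ _ _)
  · have hle := inv.hA q h (by omega)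
    rw [hN] at hle
    exact segLE_mono hle (by omega)

lemma final_strict {l : List Char} {f : List Int} {K : Nat}
    (hn : 1 ≤ l.length)
    (inv : BoothInv (l ++ l) (l ++ l).length f K) :
    ∀ q, q < K → segLT (l ++ l) K q l.length := by
  set n := l.length with hn'
  have hN : (l ++ l).length = 2 * n := by simp [hn']; omega
  have hKn : K < n := final_K_lt_n hn inv
  intro q hq
  have hlt := inv.hB q hq
  rw [hN] at hlt
  obtain ⟨r, hr, hpre, hstrict⟩ := hlt
  rcases Nat.lt_or_ge r n with hrn | hrn
  · exact ⟨r, hrn, hpre, hstrict⟩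
  · exfalso
    have he : segEq (l ++ l) K q n := segEq_mono hpre hrn
    have := seg_full_ext l K q hKn (by omega) he r (by omega) (by omega)
    rw [this] at hstrict
    exact lt_irrefl _ hstrict

lemma alt_fold (l : List Char) :
    ∀ jj, 1 ≤ jj → jj ≤ l.length →
    ∃ B : Nat, (PySem.List.pyRange 1 (jj:Int) 1).foldl
        (fun best i => if rotAt l i < rotAt l best then i else best) 0 = (B:Int) ∧
      B < jj ∧ (∀ q, q < jj → ¬ rotAt l (q:Int) < rotAt l (B:Int)) ∧
      (∀ q, q < B → rotAt l (B:Int) < rotAt l (q:Int)) := by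
  intro jj
  induction jj with
  | zero => omega
  | succ m IH =>
    intro h1 h2
    rcases Nat.eq_zero_or_pos m with hm0 | hmpos
    · subst hm0
      refine ⟨0, ?_, Nat.one_pos, ?_, ?_⟩
      · rw [PySem.List.pyRange_one_eq_nil (by norm_num)]
        rfl
      · intro q hq
        have hq0 : q = 0 := by omega
        subst hq0
        exact lt_irrefl _
      · intro q hq; omega
    · obtain ⟨B, hfold, hBlt, hmin, hstr⟩ := IH hmpos (by omega)
      have e : ((m+1 : Nat) : Int) = (m : Int) + 1 := by push_cast; ring
      rw [e, PySem.List.pyRange_one_succ_right (by exact_mod_cast Nat.one_le_cast.mpr hmpos),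
        List.foldl_append, hfold]
      simp only [List.foldl_cons, List.foldl_nil]
      by_cases hnew : rotAt l (m:Int) < rotAt l (B:Int)
      · rw [if_pos hnew]
        refine ⟨m, rfl, by omega, ?_, ?_⟩
        · intro q hq
          rcases Nat.lt_or_ge q m with h | h
          · have hle := not_lt.mp (hmin q h)
            exact not_lt.mpr (le_of_lt (lt_of_lt_of_le hnew hle))
          · have hqm : q = m := by omega
            subst hqm
            exact lt_irrefl _
        · intro q hq
          exact lt_of_lt_of_le hnew (not_lt.mp (hmin q hq))
      · rw [if_neg hnew]
        refine ⟨B, rfl, by omega, ?_, hstr⟩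
        intro q hq
        rcases Nat.lt_or_ge q m with h | h
        · exact hmin q h
        · have hqm : q = m := by omega
          subst hqm
          exact hnew

-- both ports are 0 on the empty string
lemma empty_case (s : String) (hl : s.toList = []) :
    boot_algo s = boot_algo_alt s := by
  show ((PySem.List.pyRange 1 (PySem.List.len (s.toList ++ s.toList)) 1).foldl
      (fun st j => bootStep (s.toList ++ s.toList) st j)
      (PySem.List.pyRepeat [(-1 : Int)] (PySem.List.len (s.toList ++ s.toList)), 0)).2 =
    (PySem.List.pyRange 1 (PySem.List.len s.toList) 1).foldl
      (fun best i => if rotAt s.toList i < rotAt s.toList best then i else best) 0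
  rw [hl]
  rfl

theorem boot_agree (s : String) : boot_algo s = boot_algo_alt s := by
  rcases eq_or_ne s.toList [] with hl | hl
  · exact empty_case s hl
  · set l := s.toList with hldef
    have hn : 1 ≤ l.length := List.length_pos_iff.mpr hl
    set n := l.length with hn'
    have hN : (l ++ l).length = 2 * n := by simp [hn']; omega
    -- run A
    obtain ⟨f, K, hfoldA, hinv⟩ :=
      runBooth_inv (l ++ l) (l ++ l).length (by omega) (le_refl _)
    have hA : boot_algo s = (K : Int) := by
      show ((PySem.List.pyRange 1 (PySem.List.len (l ++ l)) 1).foldl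
          (fun st j => bootStep (l ++ l) st j)
          (PySem.List.pyRepeat [(-1 : Int)] (PySem.List.len (l ++ l)), 0)).2 = (K : Int)
      rw [PySem.List.len_eq, hfoldA]
    -- run B
    obtain ⟨B, hfoldB, hBlt, hmin, hstr⟩ := alt_fold l n hn (le_refl _)
    have hB : boot_algo_alt s = (B : Int) := by
      show (PySem.List.pyRange 1 (PySem.List.len l) 1).foldl
          (fun best i => if rotAt l i < rotAt l best then i else best) 0 = (B : Int)
      rw [PySem.List.len_eq, hfoldB]
    -- A's k is also the first-wins argmin of the rotations
    have hKn : K < n := final_K_lt_n hn hinv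
    have hminA : ∀ q, q < n → ¬ rotAt l (q:Int) < rotAt l (K:Int) := by
      intro q hq
      rcases final_min hn hinv q hq with hlt | heq
      · exact not_lt.mpr (le_of_lt ((rot_lt_iff l K q (by omega) (by omega)).mpr hlt))
      · rw [← (rot_eq_iff l K q (by omega) (by omega)).mpr heq]
        exact lt_irrefl _
    have hstrA : ∀ q, q < K → rotAt l (K:Int) < rotAt l (q:Int) := by
      intro q hq
      exact (rot_lt_iff l K q (by omega) (by omega)).mpr (final_strict hn hinv q hq)
    -- first-wins argmins are unique
    have hKB : K = B := by
      rcases Nat.lt_trichotomy K B with h | h | h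
      · exact absurd (hstr K h) (hminA B hBlt)
      · exact h
      · exact absurd (hstrA B h) (hmin K hKn)
    rw [hA, hB, hKB]

-- ===== VERDICT (by name: the statement is the Claim_ definition above) =====
theorem boot_algo_spec : Claim_equal_boot_algo := by
  intro s _
  show boot_algo s = boot_algo_alt s
  exact boot_agree s
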